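-- pv_equiv track=rewrite | github.com/browonkim/cote | temporary.py | getTheGroups
-- ===== SOURCE A (Python) =====
-- def getTheGroups(n, queryType, students1, students2):
--     # Write your code here
--     answer = []
--     mydict = {}
--
--     def find_root(k):
--         if mydict[k] < 0:
--             return k
--         else:
--             return find_root(mydict[k])
--
--     for seq, query in enumerate(queryType):
--         if query == "Friend":
--             if students1[seq] not in mydict:
--                 mydict[students1[seq]] = -1
--             if students2[seq] not in mydict:
--                 mydict[students2[seq]] = -1
--             temp_i = find_root(students1[seq])
--             temp_j = find_root(students2[seq])
--             if temp_i == temp_j: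
--                 continue
--             elif mydict[temp_i] <= mydict[temp_j]:
--                 mydict[temp_i] += mydict[temp_j]
--                 mydict[temp_j] = temp_i
--             else:
--                 mydict[temp_j] += mydict[temp_i]
--                 mydict[temp_i] = temp_j
--         else:
--             if students2[seq] not in mydict:
--                 mydict[students2[seq]] = -1
--             if students1[seq] not in mydict:
--                 mydict[students1[seq]] = -1
--             temp = mydict[find_root(students2[seq])] + mydict[find_root(students1[seq])]
--             answer.append(-temp)
--     return answer
-- ===== SOURCE B (Python) =====
-- def getTheGroups(n, queryType, students1, students2):
--     # Weighted quick-find: leader[s] is the current group label of s, members[g]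
--     # the list of students labelled g; a merge relabels the smaller group.
--     answer = []
--     leader = {}
--     members = {}
--
--     def add(s):
--         if s not in leader:
--             leader[s] = s
--             members[s] = [s]
--
--     for query, a, b in zip(queryType, students1, students2):
--         if query == "Friend":
--             add(a)
--             add(b)
--             ra, rb = leader[a], leader[b]
--             if ra != rb:
--                 if len(members[rb]) <= len(members[ra]):
--                     big, small = ra, rb
--                 else:
--                     big, small = rb, ra
--                 for s in members[small]:
--                     leader[s] = big
--                 members[big].extend(members[small])
--                 del members[small]
--         else:
--             add(b)
--             add(a)
--             answer.append(len(members[leader[a]]) + len(members[leader[b]]))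
--     return answer
-- ===== Notes on version B (the rewrite author's own statement) =====
-- stated objective: alternative
-- what changed: A is a union-by-size union-find forest (dict value = parent id, or minus the group size at roots) with a recursive find_root walk per query; B keeps no forest at all: a weighted quick-find with a direct student->leader map plus per-leader member lists, merging by relabelling the smaller group's members, so lookups are single dict reads and no root walk exists.
-- outside the precondition, e.g. on getTheGroups(1, ['Friend', 'x'], [-5, -5], [2, 2]): A returns [7], B returns [4]
import Mathlib
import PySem

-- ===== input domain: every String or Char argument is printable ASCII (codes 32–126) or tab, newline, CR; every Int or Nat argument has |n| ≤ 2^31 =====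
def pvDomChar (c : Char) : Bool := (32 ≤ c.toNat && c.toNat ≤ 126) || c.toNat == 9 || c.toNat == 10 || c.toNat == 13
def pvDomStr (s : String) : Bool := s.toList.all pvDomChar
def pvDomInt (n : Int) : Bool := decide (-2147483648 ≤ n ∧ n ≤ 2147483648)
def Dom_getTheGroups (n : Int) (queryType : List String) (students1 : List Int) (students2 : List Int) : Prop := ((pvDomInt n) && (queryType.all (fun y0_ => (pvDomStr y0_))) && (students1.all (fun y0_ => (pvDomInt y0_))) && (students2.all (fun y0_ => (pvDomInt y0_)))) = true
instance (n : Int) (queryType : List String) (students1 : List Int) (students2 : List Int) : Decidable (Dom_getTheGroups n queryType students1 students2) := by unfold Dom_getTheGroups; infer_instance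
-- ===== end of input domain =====

-- B is a weighted quick-find (leader map + member lists, relabel the smaller group) instead of
-- A's union-by-size forest with a recursive root walk: an alternative algorithm of similar cost.
-- Equivalence is about the return value; neither program mutates its arguments.

-- ===== PORT A =====
-- A's recursive find_root; the fuel (never exhausted on reachable states: parent chains are acyclic
-- and shorter than the number of keys) makes the recursion structural; `none` = Python KeyError,
-- unreachable because find_root is only ever called on present keys.
def pvFindRoot (d : PySem.Dict Int Int) : Nat → Int → Int
  | 0, k => k
  | fuel+1, k =>
    match d.get? k with
    | none => k
    | some v => if v < 0 then k else pvFindRoot d fuel v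

def pvLoopA (students1 students2 : List Int) : Nat → List String → PySem.Dict Int Int → List Int → List Int
  | _, [], _, ans => ans
  | seq, query :: rest, d0, ans =>
    let s1 := PySem.List.pyGetD students1 (seq : Int) 0
    let s2 := PySem.List.pyGetD students2 (seq : Int) 0
    if query = "Friend" then
      let d1 := if d0.contains s1 then d0 else d0.insert s1 (-1)
      let d := if d1.contains s2 then d1 else d1.insert s2 (-1)
      let ti := pvFindRoot d (d.size + 1) s1
      let tj := pvFindRoot d (d.size + 1) s2
      if ti = tj then pvLoopA students1 students2 (seq+1) rest d ans
      else if d.getD ti 0 ≤ d.getD tj 0 then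
        pvLoopA students1 students2 (seq+1) rest ((d.insert ti (d.getD ti 0 + d.getD tj 0)).insert tj ti) ans
      else
        pvLoopA students1 students2 (seq+1) rest ((d.insert tj (d.getD tj 0 + d.getD ti 0)).insert ti tj) ans
    else
      let d1 := if d0.contains s2 then d0 else d0.insert s2 (-1)
      let d := if d1.contains s1 then d1 else d1.insert s1 (-1)
      let temp := d.getD (pvFindRoot d (d.size + 1) s2) 0 + d.getD (pvFindRoot d (d.size + 1) s1) 0
      pvLoopA students1 students2 (seq+1) rest d (ans ++ [-temp])

def getTheGroups (n : Int) (queryType : List String) (students1 : List Int) (students2 : List Int) : List Int :=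
  pvLoopA students1 students2 0 queryType PySem.Dict.empty []

-- ===== PORT B =====
def pvAddB (st : PySem.Dict Int Int × PySem.Dict Int (List Int)) (s : Int) :
    PySem.Dict Int Int × PySem.Dict Int (List Int) :=
  if st.1.contains s then st else (st.1.insert s s, st.2.insert s [s])

def pvLoopB : List (String × Int × Int) → PySem.Dict Int Int × PySem.Dict Int (List Int) → List Int → List Int
  | [], _, ans => ans
  | (query, a, b) :: rest, st0, ans =>
    if query = "Friend" then
      let st := pvAddB (pvAddB st0 a) b
      let ra := st.1.getD a 0
      let rb := st.1.getD b 0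
      if ra = rb then pvLoopB rest st ans
      else
        let p := if (st.2.getD rb []).length ≤ (st.2.getD ra []).length then (ra, rb) else (rb, ra)
        let msmall := st.2.getD p.2 []
        let mbig := st.2.getD p.1 []
        let L' := msmall.foldl (fun L s => L.insert s p.1) st.1
        pvLoopB rest (L', (st.2.insert p.1 (mbig ++ msmall)).erase p.2) ans
    else
      let st := pvAddB (pvAddB st0 b) a
      pvLoopB rest st
        (ans ++ [((st.2.getD (st.1.getD a 0) []).length : Int) + ((st.2.getD (st.1.getD b 0) []).length : Int)])

def getTheGroups_alt (n : Int) (queryType : List String) (students1 : List Int) (students2 : List Int) : List Int :=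
  pvLoopB (queryType.zip (students1.zip students2)) (PySem.Dict.empty, PySem.Dict.empty) []

-- ===== PRECONDITION & SPEC =====
-- an "effective merge": some processed query row is a Friend row with two distinct students
def EffFriend (queryType : List String) (students1 students2 : List Int) : Prop :=
  ∃ p ∈ queryType.zip (students1.zip students2), p.1 = "Friend" ∧ p.2.1 ≠ p.2.2

-- Pre_ excludes (a) inputs on which A raises IndexError (students lists shorter than queryType) and
-- (b) inputs with negative student ids together with an effective Friend merge: the problem's natural
-- domain is nonnegative student ids, and A's dict encoding (value < 0 = group size, else parent id)
-- presupposes that, so its totals on negative ids under a merge are accidental.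
def Pre_getTheGroups (n : Int) (queryType : List String) (students1 : List Int) (students2 : List Int) : Prop :=
  queryType.length ≤ students1.length ∧ queryType.length ≤ students2.length ∧
  (EffFriend queryType students1 students2 →
    ∀ p ∈ queryType.zip (students1.zip students2), 0 ≤ p.2.1 ∧ 0 ≤ p.2.2)

instance (n : Int) (queryType : List String) (students1 : List Int) (students2 : List Int) : Decidable (Pre_getTheGroups n queryType students1 students2) := by
  unfold Pre_getTheGroups EffFriend; infer_instance

def pvWitness_getTheGroups : Int × List String × List Int × List Int :=
  (2, ["Friend", "Total"], [1, 1], [2, 2])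

def Spec_getTheGroups (n : Int) (queryType : List String) (students1 : List Int) (students2 : List Int) (out : List Int) : Prop := out = getTheGroups_alt n queryType students1 students2
instance (n : Int) (queryType : List String) (students1 : List Int) (students2 : List Int) (out : List Int) : Decidable (Spec_getTheGroups n queryType students1 students2 out) := by unfold Spec_getTheGroups; infer_instance

-- ===== CLAIM (what is proved, stated in full; the proofs are below) =====
def Claim_equal_getTheGroups : Prop := ∀ (n : Int) (queryType : List String) (students1 : List Int) (students2 : List Int), Dom_getTheGroups n queryType students1 students2 → Pre_getTheGroups n queryType students1 students2 → Spec_getTheGroups n queryType students1 students2 (getTheGroups n queryType students1 students2)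

-- ===== LEMMAS AND PROOFS =====

-- get? after erase (PySem.Dict.erase is a filter on the items list)
theorem pvFind?_filter_ne {ν : Type} (items : List (Int × ν)) (k x : Int) :
    (items.filter (fun p => !(p.1 == k))).find? (fun p => p.1 == x) =
      if x = k then none else items.find? (fun p => p.1 == x) := by
  induction items with
  | nil => simp
  | cons p rest ih =>
    by_cases hpk : p.1 = k <;> by_cases hpx : p.1 = x <;> by_cases hxk : x = k <;>
      simp_all [List.filter_cons, List.find?_cons]

theorem pvGet?_erase {ν : Type} (d : PySem.Dict Int ν) (k x : Int) :
    (d.erase k).get? x = if x = k then none else d.get? x := by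
  obtain ⟨items⟩ := d
  simp only [PySem.Dict.erase, PySem.Dict.get?, pvFind?_filter_ne]
  split_ifs <;> simp

-- get? after a constant-value relabelling loop
theorem pvGet?_foldl_insert_const (lst : List Int) (L : PySem.Dict Int Int) (r x : Int) :
    (lst.foldl (fun L s => L.insert s r) L).get? x = if x ∈ lst then some r else L.get? x := by
  induction lst generalizing L with
  | nil => simp
  | cons y t ih =>
    simp only [List.foldl_cons, ih, List.mem_cons]
    by_cases hxt : x ∈ t <;> by_cases hxy : x = y <;>
      simp [hxt, hxy, PySem.Dict.get?_insert]

-- erasing an element keeps the relative order of the others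
theorem pvIdxOf_erase_lt {l : List Int} {a b c : Int} (hnd : l.Nodup)
    (ha : a ∈ l) (hb : b ∈ l) (hac : a ≠ c) (hbc : b ≠ c)
    (hab : List.idxOf a l < List.idxOf b l) :
    List.idxOf a (l.erase c) < List.idxOf b (l.erase c) := by
  by_cases hc : c ∈ l
  · obtain ⟨u, w, hcu, rfl, herase⟩ := List.exists_erase_eq hc
    rw [herase]
    have hau : a ∈ u ∨ a ∈ w := by
      rcases List.mem_append.mp ha with h | h
      · exact Or.inl h
      · rcases List.mem_cons.mp h with h | h
        · exact absurd h hac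
        · exact Or.inr h
    have hbu : b ∈ u ∨ b ∈ w := by
      rcases List.mem_append.mp hb with h | h
      · exact Or.inl h
      · rcases List.mem_cons.mp h with h | h
        · exact absurd h hbc
        · exact Or.inr h
    rcases hau with hau | haw <;> rcases hbu with hbu | hbw
    · rw [List.idxOf_append, List.idxOf_append, if_pos hau, if_pos hbu]
      rwa [List.idxOf_append, List.idxOf_append, if_pos hau, if_pos hbu] at hab
    · have hbu' : b ∉ u := by
        intro hmem
        have := List.disjoint_of_nodup_append (by simpa using hnd)
        exact (this hmem) (by simp [hbw])
      rw [List.idxOf_append, List.idxOf_append, if_pos hau, if_neg hbu']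
      have := List.idxOf_lt_length_of_mem hau
      omega
    · have hau' : a ∉ u := by
        intro hmem
        have := List.disjoint_of_nodup_append (by simpa using hnd)
        exact (this hmem) (by simp [haw])
      rw [List.idxOf_append, List.idxOf_append, if_neg hau', if_pos hbu] at hab
      have := List.idxOf_lt_length_of_mem hbu
      omega
    · have hau' : a ∉ u := by
        intro hmem
        have := List.disjoint_of_nodup_append (by simpa using hnd)
        exact (this hmem) (by simp [haw])
      have hbu' : b ∉ u := by
        intro hmem
        have := List.disjoint_of_nodup_append (by simpa using hnd)
        exact (this hmem) (by simp [hbw])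
      rw [List.idxOf_append, List.idxOf_append, if_neg hau', if_neg hbu'] at hab ⊢
      rw [List.idxOf_cons_ne _ (Ne.symm hac), List.idxOf_cons_ne _ (Ne.symm hbc)] at hab
      omega
  · rw [List.erase_of_not_mem hc]; exact hab

-- the relational invariant between A's forest (d) and B's quick-find state (L, M),
-- with an explicit acyclicity order witness
structure pvInvO (ord : List Int) (d L : PySem.Dict Int Int) (M : PySem.Dict Int (List Int)) : Prop where
  nodup : ord.Nodup
  memOrd : ∀ k, k ∈ ord ↔ (d.get? k).isSome
  keysLR : ∀ k, (d.get? k).isSome ↔ (L.get? k).isSome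
  edge : ∀ k v, d.get? k = some v → 0 ≤ v →
    (d.get? v).isSome ∧ L.get? k = L.get? v ∧ List.idxOf v ord < List.idxOf k ord
  selfroot : ∀ k v, d.get? k = some v → v < 0 → L.get? k = some k
  ldr : ∀ k r, L.get? k = some r → ∃ s, d.get? r = some s ∧ s < 0
  rootlist : ∀ r s, d.get? r = some s → s < 0 →
    ∃ lst, M.get? r = some lst ∧ (lst.length : Int) = -s ∧ ∀ x, L.get? x = some r ↔ x ∈ lst
  keysNonneg : ∀ k, (d.get? k).isSome → 0 ≤ k

def pvInv (d L : PySem.Dict Int Int) (M : PySem.Dict Int (List Int)) : Prop :=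
  ∃ ord, pvInvO ord d L M

theorem pvInv_empty : pvInv PySem.Dict.empty PySem.Dict.empty PySem.Dict.empty := by
  refine ⟨[], ?_, ?_, ?_, ?_, ?_, ?_, ?_, ?_⟩ <;> simp [PySem.Dict.get?_empty]

theorem pvFindRoot_eq_of {ord : List Int} {d L : PySem.Dict Int Int} {M : PySem.Dict Int (List Int)}
    (hI : pvInvO ord d L M) :
    ∀ (fuel : Nat) (k r : Int), L.get? k = some r → List.idxOf k ord < fuel →
      pvFindRoot d fuel k = r := by
  intro fuel
  induction fuel with
  | zero => intro k r _ hf; exact absurd hf (Nat.not_lt_zero _)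
  | succ f ih =>
    intro k r hk hf
    have hks : (d.get? k).isSome := (hI.keysLR k).mpr (by simp [hk])
    obtain ⟨v, hv⟩ := Option.isSome_iff_exists.mp hks
    by_cases hvneg : v < 0
    · have hself := hI.selfroot k v hv hvneg
      rw [hk] at hself
      simp [pvFindRoot, hv, hvneg]
      exact (Option.some_injective _ hself).symm
    · obtain ⟨_, hLL, hidx⟩ := hI.edge k v hv (by omega)
      simp only [pvFindRoot, hv, if_neg hvneg]
      exact ih v r (hLL ▸ hk) (by omega)

theorem pvFind_root {d L : PySem.Dict Int Int} {M : PySem.Dict Int (List Int)}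
    (hI : pvInv d L M) (k r : Int) (hk : L.get? k = some r) :
    pvFindRoot d (d.size + 1) k = r := by
  obtain ⟨ord, hO⟩ := hI
  have hks : (d.get? k).isSome := (hO.keysLR k).mpr (by simp [hk])
  have hkm : k ∈ ord := (hO.memOrd k).mpr hks
  have hsub : ord ⊆ d.keys := by
    intro x hx
    have hxs := (hO.memOrd x).mp hx
    by_contra hnk
    rw [← PySem.Dict.get?_eq_none_iff_not_mem_keys] at hnk
    simp [hnk] at hxs
  have hlen : ord.length ≤ d.keys.length := (List.subperm_of_subset hO.nodup hsub).length_le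
  have hkeyslen : d.keys.length = d.size := by
    simp [PySem.Dict.keys, PySem.Dict.size]
  have hidx := List.idxOf_lt_length_of_mem hkm
  exact pvFindRoot_eq_of hO (d.size + 1) k r hk (by omega)

theorem pvAddB_get?_self (L : PySem.Dict Int Int) (M : PySem.Dict Int (List Int)) (s : Int) :
    ∃ r, (pvAddB (L, M) s).1.get? s = some r := by
  unfold pvAddB
  by_cases hc : L.contains s = true
  · rw [PySem.Dict.contains_eq_isSome_get?] at hc
    obtain ⟨r, hr⟩ := Option.isSome_iff_exists.mp hc
    exact ⟨r, by simp [hc, hr, PySem.Dict.contains_eq_isSome_get?]⟩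
  · refine ⟨s, ?_⟩
    simp only [hc]
    simp [PySem.Dict.get?_insert_self]

theorem pvAddB_get?_mono {L : PySem.Dict Int Int} {M : PySem.Dict Int (List Int)} {x : Int} {r : Int}
    (s : Int) (h : L.get? x = some r) :
    (pvAddB (L, M) s).1.get? x = some r := by
  unfold pvAddB
  by_cases hc : L.contains s = true
  · simp [hc, h]
  · have hxs : x ≠ s := by
      rintro rfl
      rw [PySem.Dict.contains_eq_isSome_get?] at hc
      simp [h] at hc
    simp only [hc]
    simp [PySem.Dict.get?_insert, hxs, h]

theorem pvInv_contains_eq {d L : PySem.Dict Int Int} {M : PySem.Dict Int (List Int)}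
    (hI : pvInv d L M) (x : Int) : L.contains x = d.contains x := by
  obtain ⟨ord, hO⟩ := hI
  rw [PySem.Dict.contains_eq_isSome_get?, PySem.Dict.contains_eq_isSome_get?]
  have := hO.keysLR x
  by_cases h : (d.get? x).isSome = true <;> simp_all

-- invariant preservation: the "add if absent" step on both sides
theorem pvInv_add {d L : PySem.Dict Int Int} {M : PySem.Dict Int (List Int)}
    (hI : pvInv d L M) (s : Int) (hs : 0 ≤ s) :
    pvInv (if d.contains s then d else d.insert s (-1)) (pvAddB (L, M) s).1 (pvAddB (L, M) s).2 := by
  obtain ⟨ord, hO⟩ := hI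
  have hLd : L.contains s = d.contains s := pvInv_contains_eq ⟨ord, hO⟩ s
  unfold pvAddB
  by_cases hc : d.contains s = true
  · simp only [hc, hLd, if_true]
    exact ⟨ord, hO⟩
  · simp only [hc, hLd, Bool.false_eq_true, if_false]
    rw [PySem.Dict.contains_eq_isSome_get?] at hc
    have hds : d.get? s = none := by
      cases h : d.get? s <;> simp_all
    have hLs : L.get? s = none := by
      have := hO.keysLR s
      cases h : L.get? s <;> simp_all
    have hsOrd : s ∉ ord := by
      intro h
      have := (hO.memOrd s).mp h
      simp [hds] at this
    refine ⟨ord ++ [s], ?_, ?_, ?_, ?_, ?_, ?_, ?_, ?_⟩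
    · simp only [List.nodup_append, List.nodup_cons, List.nodup_nil, List.disjoint_singleton]
      refine ⟨hO.nodup, by simp, fun a ha b hb => ?_⟩
      simp only [List.mem_singleton] at hb
      subst hb
      exact fun h => hsOrd (h ▸ ha)
    · intro k
      by_cases hks : k = s
      · subst hks; simp [PySem.Dict.get?_insert]
      · simp [List.mem_append, hks, PySem.Dict.get?_insert, hO.memOrd k]
    · intro k
      by_cases hks : k = s
      · subst hks; simp [PySem.Dict.get?_insert]
      · simp [PySem.Dict.get?_insert, hks, hO.keysLR k]
    · intro k v hkv hv0
      by_cases hks : k = s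
      · subst hks
        rw [PySem.Dict.get?_insert, if_pos rfl] at hkv
        have : v = -1 := by simpa using hkv.symm
        omega
      · rw [PySem.Dict.get?_insert, if_neg hks] at hkv
        obtain ⟨hvs, hLL, hidx⟩ := hO.edge k v hkv hv0
        have hvsne : v ≠ s := by
          intro h; rw [h, hds] at hvs; simp at hvs
        have hkm : k ∈ ord := (hO.memOrd k).mpr (by simp [hkv])
        have hvm : v ∈ ord := (hO.memOrd v).mpr hvs
        refine ⟨by simp [PySem.Dict.get?_insert, hvsne, hvs], ?_, ?_⟩
        · simp [PySem.Dict.get?_insert, hks, hvsne, hLL]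
        · rw [List.idxOf_append, List.idxOf_append, if_pos hkm, if_pos hvm]
          exact hidx
    · intro k v hkv hvneg
      by_cases hks : k = s
      · subst hks; simp [PySem.Dict.get?_insert]
      · rw [PySem.Dict.get?_insert, if_neg hks] at hkv
        simp [PySem.Dict.get?_insert, hks, hO.selfroot k v hkv hvneg]
    · intro k r hkr
      by_cases hks : k = s
      · rw [hks, PySem.Dict.get?_insert, if_pos rfl] at hkr
        have hr : r = s := by simpa using hkr.symm
        rw [hr]
        exact ⟨-1, by simp [PySem.Dict.get?_insert], by omega⟩
      · rw [PySem.Dict.get?_insert, if_neg hks] at hkr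
        obtain ⟨t, hdt, ht⟩ := hO.ldr k r hkr
        have hrs : r ≠ s := by
          intro h; rw [h, hds] at hdt; simp at hdt
        exact ⟨t, by simp [PySem.Dict.get?_insert, hrs, hdt], ht⟩
    · intro r t hrt htneg
      by_cases hrs : r = s
      · rw [hrs] at hrt ⊢
        rw [PySem.Dict.get?_insert, if_pos rfl] at hrt
        have ht : t = -1 := by simpa using hrt.symm
        refine ⟨[s], by simp [PySem.Dict.get?_insert_self], by simp [ht], ?_⟩
        intro x
        by_cases hxs : x = s
        · rw [hxs]; simp [PySem.Dict.get?_insert]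
        · simp only [PySem.Dict.get?_insert, if_neg hxs, List.mem_singleton, hxs, iff_false]
          intro h
          obtain ⟨t', hdt', _⟩ := hO.ldr x s h
          rw [hds] at hdt'; simp at hdt'
      · rw [PySem.Dict.get?_insert, if_neg hrs] at hrt
        obtain ⟨lst, hM, hlen, hiff⟩ := hO.rootlist r t hrt htneg
        have hslst : s ∉ lst := by
          intro h
          have := (hiff s).mpr h
          rw [hLs] at this; simp at this
        refine ⟨lst, by simp [PySem.Dict.get?_insert, hrs, hM], hlen, ?_⟩
        intro x
        by_cases hxs : x = s
        · rw [hxs]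
          simp only [PySem.Dict.get?_insert, if_pos rfl]
          constructor
          · intro h
            have hsr : r = s := by simpa using h.symm
            exact absurd hsr hrs
          · intro h; exact absurd h hslst
        · simp [PySem.Dict.get?_insert, hxs, hiff x]
    · intro k hk
      by_cases hks : k = s
      · subst hks; exact hs
      · rw [PySem.Dict.get?_insert, if_neg hks] at hk
        exact hO.keysNonneg k hk

-- invariant preservation: union of two distinct roots w (winner) and l (loser)
theorem pvInv_union {d L : PySem.Dict Int Int} {M : PySem.Dict Int (List Int)}
    {w l sw sl : Int} {lw ll : List Int}
    (hI : pvInv d L M) (hwl : w ≠ l)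
    (hdw : d.get? w = some sw) (hdl : d.get? l = some sl) (hsw : sw < 0) (hsl : sl < 0)
    (_hMw : M.get? w = some lw) (_hMl : M.get? l = some ll)
    (hlenw : (lw.length : Int) = -sw) (hlenl : (ll.length : Int) = -sl)
    (hLw : ∀ x, L.get? x = some w ↔ x ∈ lw) (hLl : ∀ x, L.get? x = some l ↔ x ∈ ll) :
    pvInv ((d.insert w (sw + sl)).insert l w)
          (ll.foldl (fun L s => L.insert s w) L)
          ((M.insert w (lw ++ ll)).erase l) := by
  obtain ⟨ord, hO⟩ := hI
  have hlw2 : l ≠ w := Ne.symm hwl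
  have hw0 : (0:Int) ≤ w := hO.keysNonneg w (by simp [hdw])
  have hLww : L.get? w = some w := hO.selfroot w sw hdw hsw
  have hLll : L.get? l = some l := hO.selfroot l sl hdl hsl
  have hwm : w ∈ ord := (hO.memOrd w).mpr (by simp [hdw])
  have hlm : l ∈ ord := (hO.memOrd l).mpr (by simp [hdl])
  have hwll : w ∉ ll := by
    intro h
    have := (hLl w).mpr h
    rw [hLww] at this
    exact hwl (by simpa using this)
  have hlll : l ∈ ll := (hLl l).mp hLll
  have hd' : ∀ x, ((d.insert w (sw + sl)).insert l w).get? x =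
      if x = l then some w else if x = w then some (sw + sl) else d.get? x := by
    intro x
    rw [PySem.Dict.get?_insert, PySem.Dict.get?_insert]
  have hL' : ∀ x, (ll.foldl (fun L s => L.insert s w) L).get? x =
      if x ∈ ll then some w else L.get? x := fun x => pvGet?_foldl_insert_const ll L w x
  have hM' : ∀ x, ((M.insert w (lw ++ ll)).erase l).get? x =
      if x = l then none else if x = w then some (lw ++ ll) else M.get? x := by
    intro x
    rw [pvGet?_erase, PySem.Dict.get?_insert]
  have hdkeys : ∀ x, (((d.insert w (sw + sl)).insert l w).get? x).isSome = (d.get? x).isSome := by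
    intro x
    rw [hd']
    split_ifs with h1 h2 <;> simp [*]
  have hLkeys : ∀ x, ((ll.foldl (fun L s => L.insert s w) L).get? x).isSome = (L.get? x).isSome := by
    intro x
    rw [hL']
    split_ifs with h1
    · simp [(hLl x).mpr h1]
    · rfl
  have hordmem : ∀ x, (x ∈ w :: ord.erase w) ↔ x ∈ ord := by
    intro x
    by_cases hxw : x = w
    · simp [hxw, hwm]
    · simp [List.mem_cons, hxw, hO.nodup.mem_erase_iff]
  refine ⟨w :: ord.erase w, ?_, ?_, ?_, ?_, ?_, ?_, ?_, ?_⟩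
  · rw [List.nodup_cons]
    exact ⟨fun h => (hO.nodup.mem_erase_iff.mp h).1 rfl, hO.nodup.erase w⟩
  · intro k
    rw [hordmem k, hO.memOrd k]
    simp [hdkeys k]
  · intro k
    simp only [hdkeys k, hLkeys k]
    exact hO.keysLR k
  · intro k v hkv hv0
    rw [hd'] at hkv
    by_cases hkl : k = l
    · rw [if_pos hkl] at hkv
      have hvw : v = w := by simpa using hkv.symm
      refine ⟨?_, ?_, ?_⟩
      · rw [hvw, hd', if_neg hwl, if_pos rfl]; simp
      · rw [hkl, hvw, hL', hL', if_pos hlll, if_neg hwll, hLww]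
      · rw [hkl, hvw, List.idxOf_cons_self, List.idxOf_cons_ne _ hwl]
        omega
    · rw [if_neg hkl] at hkv
      by_cases hkw : k = w
      · rw [if_pos hkw] at hkv
        have : v = sw + sl := by simpa using hkv.symm
        omega
      · rw [if_neg hkw] at hkv
        obtain ⟨hvs, hLL, hidx⟩ := hO.edge k v hkv hv0
        have hkm : k ∈ ord := (hO.memOrd k).mpr (by simp [hkv])
        have hvm : v ∈ ord := (hO.memOrd v).mpr hvs
        have hklv : k ∈ ll ↔ v ∈ ll := by
          rw [← hLl k, ← hLl v, hLL]
        refine ⟨?_, ?_, ?_⟩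
        · rw [hd']
          split_ifs <;> simp [hvs]
        · rw [hL', hL']
          by_cases h1 : k ∈ ll
          · rw [if_pos h1, if_pos (hklv.mp h1)]
          · rw [if_neg h1, if_neg (fun h => h1 (hklv.mpr h))]
            exact hLL
        · by_cases hvw2 : v = w
          · rw [hvw2, List.idxOf_cons_self, List.idxOf_cons_ne _ (fun h => hkw h.symm)]
            omega
          · rw [List.idxOf_cons_ne _ (fun h => hvw2 h.symm), List.idxOf_cons_ne _ (fun h => hkw h.symm)]
            have := pvIdxOf_erase_lt hO.nodup hvm hkm hvw2 hkw hidx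
            omega
  · intro k v hkv hvneg
    rw [hd'] at hkv
    by_cases hkl : k = l
    · rw [if_pos hkl] at hkv
      have hvw : v = w := by simpa using hkv.symm
      exact absurd hvneg (by omega)
    · rw [if_neg hkl] at hkv
      by_cases hkw : k = w
      · rw [hkw, hL', if_neg hwll]
        exact hLww
      · rw [if_neg hkw] at hkv
        have hself := hO.selfroot k v hkv hvneg
        have hknll : k ∉ ll := by
          intro h
          have h2 := (hLl k).mpr h
          rw [hself] at h2
          exact hkl (by simpa using h2)
        rw [hL', if_neg hknll]
        exact hself
  · intro k r hkr
    rw [hL'] at hkr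
    by_cases h1 : k ∈ ll
    · rw [if_pos h1] at hkr
      have hr : r = w := by simpa using hkr.symm
      refine ⟨sw + sl, ?_, by omega⟩
      rw [hr, hd', if_neg hwl, if_pos rfl]
    · rw [if_neg h1] at hkr
      obtain ⟨t, hdt, htneg⟩ := hO.ldr k r hkr
      have hrl : r ≠ l := fun h => h1 ((hLl k).mp (h ▸ hkr))
      by_cases hrw : r = w
      · refine ⟨sw + sl, ?_, by omega⟩
        rw [hrw, hd', if_neg hwl, if_pos rfl]
      · exact ⟨t, by rw [hd', if_neg hrl, if_neg hrw]; exact hdt, htneg⟩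
  · intro r t hrt htneg
    rw [hd'] at hrt
    by_cases hrl : r = l
    · rw [if_pos hrl] at hrt
      have htw : t = w := by simpa using hrt.symm
      exact absurd htneg (by omega)
    · rw [if_neg hrl] at hrt
      by_cases hrw : r = w
      · rw [if_pos hrw] at hrt
        have ht : t = sw + sl := by simpa using hrt.symm
        refine ⟨lw ++ ll, ?_, ?_, ?_⟩
        · rw [hrw, hM', if_neg hwl, if_pos rfl]
        · rw [List.length_append]
          push_cast
          omega
        · intro x
          rw [hL']
          by_cases hx : x ∈ ll
          · simp [hx, hrw]
          · rw [if_neg hx, hrw]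
            rw [List.mem_append]
            simp [hLw x, hx]
      · rw [if_neg hrw] at hrt
        obtain ⟨lst, hM, hlen, hiff⟩ := hO.rootlist r t hrt htneg
        refine ⟨lst, by rw [hM', if_neg hrl, if_neg hrw]; exact hM, hlen, ?_⟩
        intro x
        rw [hL']
        by_cases hx : x ∈ ll
        · rw [if_pos hx]
          constructor
          · intro h
            have hw2 : w = r := by simpa using h
            exact absurd hw2.symm hrw
          · intro h
            have h1 : L.get? x = some r := (hiff x).mpr h
            have h2 : L.get? x = some l := (hLl x).mpr hx
            rw [h1] at h2
            exact absurd (by simpa using h2) hrl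
        · rw [if_neg hx]
          exact hiff x
  · intro k hk
    rw [hdkeys k] at hk
    exact hO.keysNonneg k hk

-- root data attached to a leader
theorem pvRootData {d L : PySem.Dict Int Int} {M : PySem.Dict Int (List Int)}
    (hI : pvInv d L M) {k r : Int} (hk : L.get? k = some r) :
    ∃ s lst, d.get? r = some s ∧ s < 0 ∧ M.get? r = some lst ∧ (lst.length : Int) = -s ∧
      (∀ x, L.get? x = some r ↔ x ∈ lst) := by
  obtain ⟨ord, hO⟩ := hI
  obtain ⟨s, hds, hsneg⟩ := hO.ldr k r hk
  obtain ⟨lst, hM, hlen, hiff⟩ := hO.rootlist r s hds hsneg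
  exact ⟨s, lst, hds, hsneg, hM, hlen, hiff⟩

-- main induction in the regime where every queried student id is nonnegative
theorem pvMain1 (S1 S2 : List Int) :
    ∀ (qt : List String) (s1 s2 : List Int) (seq : Nat)
      (d L : PySem.Dict Int Int) (M : PySem.Dict Int (List Int)) (ans : List Int),
      pvInv d L M →
      S1.drop seq = s1 → S2.drop seq = s2 →
      qt.length ≤ s1.length → qt.length ≤ s2.length →
      (∀ p ∈ qt.zip (s1.zip s2), 0 ≤ p.2.1 ∧ 0 ≤ p.2.2) →
      pvLoopA S1 S2 seq qt d ans = pvLoopB (qt.zip (s1.zip s2)) (L, M) ans := by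
  intro qt
  induction qt with
  | nil =>
    intro s1 s2 seq d L M ans _ _ _ _ _ _
    simp [pvLoopA, pvLoopB]
  | cons query rest ih =>
    intro s1 s2 seq d L M ans hI hd1 hd2 h1 h2 hN
    cases s1 with
    | nil => simp at h1
    | cons a s1' =>
    cases s2 with
    | nil => simp at h2
    | cons b s2' =>
    simp only [List.length_cons] at h1 h2
    have hseq1 : seq < S1.length := by
      have hlen := congrArg List.length hd1
      simp [List.length_drop] at hlen
      omega
    have hseq2 : seq < S2.length := by
      have hlen := congrArg List.length hd2
      simp [List.length_drop] at hlen
      omega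
    have hcons1 := List.drop_eq_getElem_cons hseq1
    rw [hd1] at hcons1
    injection hcons1 with hx1 hy1
    have hga : PySem.List.pyGetD S1 (seq : Int) 0 = a := by
      rw [PySem.List.pyGetD_natCast, List.getD_eq_getElem _ _ hseq1]
      exact hx1.symm
    have hdr1 : S1.drop (seq + 1) = s1' := hy1.symm
    have hcons2 := List.drop_eq_getElem_cons hseq2
    rw [hd2] at hcons2
    injection hcons2 with hx2 hy2
    have hgb : PySem.List.pyGetD S2 (seq : Int) 0 = b := by
      rw [PySem.List.pyGetD_natCast, List.getD_eq_getElem _ _ hseq2]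
      exact hx2.symm
    have hdr2 : S2.drop (seq + 1) = s2' := hy2.symm
    have hab : 0 ≤ a ∧ 0 ≤ b := by
      have := hN (query, a, b) (by simp [List.zip_cons_cons])
      simpa using this
    have hN' : ∀ p ∈ rest.zip (s1'.zip s2'), 0 ≤ p.2.1 ∧ 0 ≤ p.2.2 := by
      intro p hp
      exact hN p (by simp [List.zip_cons_cons, hp])
    by_cases hq : query = "Friend"
    · -- Friend row
      have hI1 := pvInv_add hI a hab.1
      have hI2 : pvInv
          (if (if d.contains a then d else d.insert a (-1)).contains b
            then (if d.contains a then d else d.insert a (-1))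
            else (if d.contains a then d else d.insert a (-1)).insert b (-1))
          (pvAddB (pvAddB (L, M) a) b).1 (pvAddB (pvAddB (L, M) a) b).2 :=
        pvInv_add hI1 b hab.2
      obtain ⟨ra0, hra0⟩ := pvAddB_get?_self L M a
      have hra : (pvAddB (pvAddB (L, M) a) b).1.get? a = some ra0 := pvAddB_get?_mono b hra0
      obtain ⟨rb0, hrb0⟩ := pvAddB_get?_self (pvAddB (L, M) a).1 (pvAddB (L, M) a).2 b
      have hrb : (pvAddB (pvAddB (L, M) a) b).1.get? b = some rb0 := hrb0
      obtain ⟨sa, la, hdra, hsa, hMra, hlena, hiffa⟩ := pvRootData hI2 hra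
      obtain ⟨sb, lb, hdrb, hsb, hMrb, hlenb, hiffb⟩ := pvRootData hI2 hrb
      simp only [pvLoopA, pvLoopB, List.zip_cons_cons, hga, hgb, if_pos hq]
      rw [pvFind_root hI2 a ra0 hra, pvFind_root hI2 b rb0 hrb]
      rw [PySem.Dict.getD_of_get?_eq_some _ _ hra, PySem.Dict.getD_of_get?_eq_some _ _ hrb]
      by_cases hrr : ra0 = rb0
      · rw [if_pos hrr, if_pos hrr]
        exact ih s1' s2' (seq + 1) _ _ _ ans hI2 hdr1 hdr2 (by omega) (by omega) hN'
      · rw [if_neg hrr, if_neg hrr]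
        rw [PySem.Dict.getD_of_get?_eq_some _ _ hdra, PySem.Dict.getD_of_get?_eq_some _ _ hdrb]
        rw [PySem.Dict.getD_of_get?_eq_some _ _ hMra, PySem.Dict.getD_of_get?_eq_some _ _ hMrb]
        by_cases hcmp : sa ≤ sb
        · have hlencmp : lb.length ≤ la.length := by omega
          rw [if_pos hcmp, if_pos hlencmp]
          dsimp only
          rw [PySem.Dict.getD_of_get?_eq_some _ _ hMra, PySem.Dict.getD_of_get?_eq_some _ _ hMrb]
          exact ih s1' s2' (seq + 1) _ _ _ ans
            (pvInv_union hI2 hrr hdra hdrb hsa hsb hMra hMrb hlena hlenb hiffa hiffb)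
            hdr1 hdr2 (by omega) (by omega) hN'
        · have hlencmp : ¬ (lb.length ≤ la.length) := by omega
          rw [if_neg hcmp, if_neg hlencmp]
          dsimp only
          rw [PySem.Dict.getD_of_get?_eq_some _ _ hMrb, PySem.Dict.getD_of_get?_eq_some _ _ hMra]
          exact ih s1' s2' (seq + 1) _ _ _ ans
            (pvInv_union hI2 (Ne.symm hrr) hdrb hdra hsb hsa hMrb hMra hlenb hlena hiffb hiffa)
            hdr1 hdr2 (by omega) (by omega) hN'
    · -- Total row
      have hI1 := pvInv_add hI b hab.2
      have hI2 : pvInv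
          (if (if d.contains b then d else d.insert b (-1)).contains a
            then (if d.contains b then d else d.insert b (-1))
            else (if d.contains b then d else d.insert b (-1)).insert a (-1))
          (pvAddB (pvAddB (L, M) b) a).1 (pvAddB (pvAddB (L, M) b) a).2 :=
        pvInv_add hI1 a hab.1
      obtain ⟨rb0, hrb0⟩ := pvAddB_get?_self L M b
      have hrb : (pvAddB (pvAddB (L, M) b) a).1.get? b = some rb0 := pvAddB_get?_mono a hrb0
      obtain ⟨ra0, hra0⟩ := pvAddB_get?_self (pvAddB (L, M) b).1 (pvAddB (L, M) b).2 a
      have hra : (pvAddB (pvAddB (L, M) b) a).1.get? a = some ra0 := hra0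
      obtain ⟨sa, la, hdra, hsa, hMra, hlena, hiffa⟩ := pvRootData hI2 hra
      obtain ⟨sb, lb, hdrb, hsb, hMrb, hlenb, hiffb⟩ := pvRootData hI2 hrb
      simp only [pvLoopA, pvLoopB, List.zip_cons_cons, hga, hgb, if_neg hq]
      rw [pvFind_root hI2 b rb0 hrb, pvFind_root hI2 a ra0 hra]
      rw [PySem.Dict.getD_of_get?_eq_some _ _ hdrb, PySem.Dict.getD_of_get?_eq_some _ _ hdra]
      rw [PySem.Dict.getD_of_get?_eq_some _ _ hra, PySem.Dict.getD_of_get?_eq_some _ _ hrb]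
      rw [PySem.Dict.getD_of_get?_eq_some _ _ hMra, PySem.Dict.getD_of_get?_eq_some _ _ hMrb]
      have hval : -(sb + sa) = ((la.length : Int) + (lb.length : Int)) := by omega
      rw [hval]
      exact ih s1' s2' (seq + 1) _ _ _ _ hI2 hdr1 hdr2 (by omega) (by omega) hN'

-- the degenerate regime: no Friend row ever merges two distinct students
def pvTriv (d L : PySem.Dict Int Int) (M : PySem.Dict Int (List Int)) : Prop :=
  ∀ k, (d.get? k = none ∧ L.get? k = none) ∨
       (d.get? k = some (-1) ∧ L.get? k = some k ∧ M.get? k = some [k])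

theorem pvTriv_empty : pvTriv PySem.Dict.empty PySem.Dict.empty PySem.Dict.empty := by
  intro k; left; simp [PySem.Dict.get?_empty]

theorem pvTriv_add {d L : PySem.Dict Int Int} {M : PySem.Dict Int (List Int)}
    (hI : pvTriv d L M) (s : Int) :
    pvTriv (if d.contains s then d else d.insert s (-1)) (pvAddB (L, M) s).1 (pvAddB (L, M) s).2 := by
  have hLd : L.contains s = d.contains s := by
    rw [PySem.Dict.contains_eq_isSome_get?, PySem.Dict.contains_eq_isSome_get?]
    rcases hI s with ⟨h1, h2⟩ | ⟨h1, h2, _⟩ <;> simp [h1, h2]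
  unfold pvAddB
  by_cases hc : d.contains s = true
  · simp only [hc, hLd, if_true]
    exact hI
  · simp only [hc, hLd, Bool.false_eq_true, if_false]
    intro k
    by_cases hks : k = s
    · subst hks
      right
      simp [PySem.Dict.get?_insert_self]
    · rcases hI k with ⟨h1, h2⟩ | ⟨h1, h2, h3⟩
      · left; simp [PySem.Dict.get?_insert, hks, h1, h2]
      · right; simp [PySem.Dict.get?_insert, hks, h1, h2, h3]

theorem pvMain2 (S1 S2 : List Int) :
    ∀ (qt : List String) (s1 s2 : List Int) (seq : Nat)
      (d L : PySem.Dict Int Int) (M : PySem.Dict Int (List Int)) (ans : List Int),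
      pvTriv d L M →
      S1.drop seq = s1 → S2.drop seq = s2 →
      qt.length ≤ s1.length → qt.length ≤ s2.length →
      (∀ p ∈ qt.zip (s1.zip s2), p.1 = "Friend" → p.2.1 = p.2.2) →
      pvLoopA S1 S2 seq qt d ans = pvLoopB (qt.zip (s1.zip s2)) (L, M) ans := by
  intro qt
  induction qt with
  | nil =>
    intro s1 s2 seq d L M ans _ _ _ _ _ _
    simp [pvLoopA, pvLoopB]
  | cons query rest ih =>
    intro s1 s2 seq d L M ans hT hd1 hd2 h1 h2 hF
    cases s1 with
    | nil => simp at h1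
    | cons a s1' =>
    cases s2 with
    | nil => simp at h2
    | cons b s2' =>
    simp only [List.length_cons] at h1 h2
    have hseq1 : seq < S1.length := by
      have hlen := congrArg List.length hd1
      simp [List.length_drop] at hlen
      omega
    have hseq2 : seq < S2.length := by
      have hlen := congrArg List.length hd2
      simp [List.length_drop] at hlen
      omega
    have hcons1 := List.drop_eq_getElem_cons hseq1
    rw [hd1] at hcons1
    injection hcons1 with hx1 hy1
    have hga : PySem.List.pyGetD S1 (seq : Int) 0 = a := by
      rw [PySem.List.pyGetD_natCast, List.getD_eq_getElem _ _ hseq1]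
      exact hx1.symm
    have hdr1 : S1.drop (seq + 1) = s1' := hy1.symm
    have hcons2 := List.drop_eq_getElem_cons hseq2
    rw [hd2] at hcons2
    injection hcons2 with hx2 hy2
    have hgb : PySem.List.pyGetD S2 (seq : Int) 0 = b := by
      rw [PySem.List.pyGetD_natCast, List.getD_eq_getElem _ _ hseq2]
      exact hx2.symm
    have hdr2 : S2.drop (seq + 1) = s2' := hy2.symm
    have hF' : ∀ p ∈ rest.zip (s1'.zip s2'), p.1 = "Friend" → p.2.1 = p.2.2 := by
      intro p hp
      exact hF p (by simp [List.zip_cons_cons, hp])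
    by_cases hq : query = "Friend"
    · -- Friend row: necessarily a = b, nothing merges
      have heq : a = b := hF (query, a, b) (by simp [List.zip_cons_cons]) hq
      subst heq
      have hT1 := pvTriv_add hT a
      have hget1 : (if d.contains a then d else d.insert a (-1)).get? a = some (-1) ∧
          (pvAddB (L, M) a).1.get? a = some a ∧ (pvAddB (L, M) a).2.get? a = some [a] := by
        obtain ⟨r, hr⟩ := pvAddB_get?_self L M a
        rcases hT1 a with ⟨_, h2⟩ | ⟨h1, h2, h3⟩
        · rw [hr] at h2; cases h2
        · exact ⟨h1, h2, h3⟩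
      have hc1 : (if d.contains a then d else d.insert a (-1)).contains a = true := by
        rw [PySem.Dict.contains_eq_isSome_get?, hget1.1]; rfl
      have hcL : (pvAddB (L, M) a).1.contains a = true := by
        rw [PySem.Dict.contains_eq_isSome_get?, hget1.2.1]; rfl
      have hstop : ∀ (st : PySem.Dict Int Int × PySem.Dict Int (List Int)) (s : Int),
          st.1.contains s = true → pvAddB st s = st := by
        intro st s h
        unfold pvAddB
        rw [if_pos h]
      have hBB : pvAddB (pvAddB (L, M) a) a = pvAddB (L, M) a := hstop _ a hcL
      have hfa : pvFindRoot (if d.contains a then d else d.insert a (-1))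
          ((if d.contains a then d else d.insert a (-1)).size + 1) a = a := by
        simp [pvFindRoot, hget1.1]
      simp only [pvLoopA, pvLoopB, List.zip_cons_cons, hga, hgb, if_pos hq]
      rw [if_pos hc1, hBB, hfa]
      simp only [if_true]
      exact ih s1' s2' (seq + 1) _ _ _ ans hT1 hdr1 hdr2 (by omega) (by omega) hF'
    · -- Total row: two singleton (or one) groups, answer 2
      have hT1 := pvTriv_add hT b
      have hT2 : pvTriv
          (if (if d.contains b then d else d.insert b (-1)).contains a
            then (if d.contains b then d else d.insert b (-1))
            else (if d.contains b then d else d.insert b (-1)).insert a (-1))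
          (pvAddB (pvAddB (L, M) b) a).1 (pvAddB (pvAddB (L, M) b) a).2 :=
        pvTriv_add hT1 a
      obtain ⟨ra0, hra0⟩ := pvAddB_get?_self (pvAddB (L, M) b).1 (pvAddB (L, M) b).2 a
      have hra : (pvAddB (pvAddB (L, M) b) a).1.get? a = some ra0 := hra0
      obtain ⟨rb1, hrb1⟩ := pvAddB_get?_self L M b
      have hrb : (pvAddB (pvAddB (L, M) b) a).1.get? b = some rb1 := pvAddB_get?_mono a hrb1
      have hgeta : (if (if d.contains b then d else d.insert b (-1)).contains a
            then (if d.contains b then d else d.insert b (-1))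
            else (if d.contains b then d else d.insert b (-1)).insert a (-1)).get? a = some (-1) ∧
          (pvAddB (pvAddB (L, M) b) a).1.get? a = some a ∧
          (pvAddB (pvAddB (L, M) b) a).2.get? a = some [a] := by
        rcases hT2 a with ⟨_, h2⟩ | ⟨h1, h2, h3⟩
        · rw [hra] at h2; cases h2
        · exact ⟨h1, h2, h3⟩
      have hgetb : (if (if d.contains b then d else d.insert b (-1)).contains a
            then (if d.contains b then d else d.insert b (-1))
            else (if d.contains b then d else d.insert b (-1)).insert a (-1)).get? b = some (-1) ∧
          (pvAddB (pvAddB (L, M) b) a).1.get? b = some b ∧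
          (pvAddB (pvAddB (L, M) b) a).2.get? b = some [b] := by
        rcases hT2 b with ⟨_, h2⟩ | ⟨h1, h2, h3⟩
        · rw [hrb] at h2; cases h2
        · exact ⟨h1, h2, h3⟩
      have hfa : pvFindRoot (if (if d.contains b then d else d.insert b (-1)).contains a
            then (if d.contains b then d else d.insert b (-1))
            else (if d.contains b then d else d.insert b (-1)).insert a (-1)) ((if (if d.contains b then d else d.insert b (-1)).contains a
            then (if d.contains b then d else d.insert b (-1))
            else (if d.contains b then d else d.insert b (-1)).insert a (-1)).size + 1) a = a := by
        simp [pvFindRoot, hgeta.1]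
      have hfb : pvFindRoot (if (if d.contains b then d else d.insert b (-1)).contains a
            then (if d.contains b then d else d.insert b (-1))
            else (if d.contains b then d else d.insert b (-1)).insert a (-1)) ((if (if d.contains b then d else d.insert b (-1)).contains a
            then (if d.contains b then d else d.insert b (-1))
            else (if d.contains b then d else d.insert b (-1)).insert a (-1)).size + 1) b = b := by
        simp [pvFindRoot, hgetb.1]
      simp only [pvLoopA, pvLoopB, List.zip_cons_cons, hga, hgb, if_neg hq]
      rw [hfa, hfb]
      rw [PySem.Dict.getD_of_get?_eq_some _ _ hgeta.1, PySem.Dict.getD_of_get?_eq_some _ _ hgetb.1]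
      rw [PySem.Dict.getD_of_get?_eq_some _ _ hgeta.2.1, PySem.Dict.getD_of_get?_eq_some _ _ hgetb.2.1]
      rw [PySem.Dict.getD_of_get?_eq_some _ _ hgeta.2.2, PySem.Dict.getD_of_get?_eq_some _ _ hgetb.2.2]
      have hval : (-(-1 + -1) : Int) = (([a].length : Int) + ([b].length : Int)) := by simp
      rw [hval]
      exact ih s1' s2' (seq + 1) _ _ _ _ hT2 hdr1 hdr2 (by omega) (by omega) hF'

-- ===== VERDICT (by name: the statement is the Claim_ definition above) =====
theorem getTheGroups_spec : Claim_equal_getTheGroups := by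
  unfold Claim_equal_getTheGroups
  intro n qt s1 s2 _hdom hpre
  obtain ⟨h1, h2, h3⟩ := hpre
  unfold Spec_getTheGroups getTheGroups getTheGroups_alt
  by_cases hEff : EffFriend qt s1 s2
  · exact pvMain1 s1 s2 qt s1 s2 0 _ _ _ [] pvInv_empty (by simp) (by simp) h1 h2 (h3 hEff)
  · have hF : ∀ p ∈ qt.zip (s1.zip s2), p.1 = "Friend" → p.2.1 = p.2.2 := by
      intro p hp hq
      by_contra hne
      exact hEff ⟨p, hp, hq, hne⟩
    exact pvMain2 s1 s2 qt s1 s2 0 _ _ _ [] pvTriv_empty (by simp) (by simp) h1 h2 hF
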